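-- pv_equiv track=rewrite | github.com/01ArmanSardar/PYTHON | week 01-Introduction to python/Module--4--Assignment 01/good_sequance.py | find_good_sequance
-- ===== SOURCE A (Python) =====
-- def find_good_sequance(N,A):
--     count_dict={}
--     for x in A:
--         count_dict[x]=count_dict.get(x,0)+1
--     total_removed=0
--     for x,count in count_dict.items():
--         exxcess_ocurrences=max(0,count-x)
--         total_removed+=exxcess_ocurrences
--     return total_removed
-- ===== SOURCE B (Python) =====
-- def find_good_sequance(N, A):
--     s = sorted(A)
--     if not s:
--         return 0
--     total = 0
--     cur = s[0]
--     run = 1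
--     for x in s[1:]:
--         if x == cur:
--             run += 1
--         else:
--             total += max(0, run - cur)
--             cur, run = x, 1
--     return total + max(0, run - cur)
-- ===== Notes on version B (the rewrite author's own statement) =====
-- stated objective: alternative
-- what changed: Replaces the hash-map tally plus a second pass over dict items with a sort-then-scan: B sorts A and makes one pass over the sorted list accumulating run lengths of equal consecutive values, adding max(0, run - value) when each run ends.
import Mathlib
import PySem

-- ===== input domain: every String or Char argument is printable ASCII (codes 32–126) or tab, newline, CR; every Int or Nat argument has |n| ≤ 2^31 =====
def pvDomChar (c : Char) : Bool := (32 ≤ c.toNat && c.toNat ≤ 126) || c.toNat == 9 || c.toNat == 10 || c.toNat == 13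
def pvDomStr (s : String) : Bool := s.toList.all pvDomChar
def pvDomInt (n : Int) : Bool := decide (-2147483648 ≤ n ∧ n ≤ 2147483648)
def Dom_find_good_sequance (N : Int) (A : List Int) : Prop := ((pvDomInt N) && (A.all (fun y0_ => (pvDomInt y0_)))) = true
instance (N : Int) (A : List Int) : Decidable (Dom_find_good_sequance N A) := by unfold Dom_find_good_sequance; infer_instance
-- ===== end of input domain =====

-- B replaces A's hash-map tally plus second pass over dict items with a sort-then-scan over
-- runs of equal consecutive elements (alternative algorithm, same return value).

-- ===== PORT A =====
def find_good_sequance (N : Int) (A : List Int) : Int :=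
  let count_dict : PySem.Dict Int Int :=
    A.foldl (fun d x => d.insert x (d.getD x 0 + 1)) PySem.Dict.empty
  count_dict.items.foldl (fun total p => total + max 0 (p.2 - p.1)) 0

-- ===== PORT B =====
-- the run-length scan of Source B's for-loop: state (cur, run, total) over the tail of sorted A
def fgsScan : List Int → Int → Int → Int → Int
  | [], cur, run, total => total + max 0 (run - cur)
  | x :: xs, cur, run, total =>
    if x = cur then fgsScan xs cur (run + 1) total
    else fgsScan xs x 1 (total + max 0 (run - cur))

def find_good_sequance_alt (N : Int) (A : List Int) : Int :=
  match PySem.List.sorted A (fun x => x) false with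
  | [] => 0
  | x :: xs => fgsScan xs x 1 0

-- ===== PRECONDITION & SPEC =====
def Spec_find_good_sequance (N : Int) (A : List Int) (out : Int) : Prop := out = find_good_sequance_alt N A
instance (N : Int) (A : List Int) (out : Int) : Decidable (Spec_find_good_sequance N A out) := by unfold Spec_find_good_sequance; infer_instance

-- ===== CLAIM (what is proved, stated in full; the proofs are below) =====
def Claim_equal_find_good_sequance : Prop := ∀ (N : Int) (A : List Int), Dom_find_good_sequance N A → Spec_find_good_sequance N A (find_good_sequance N A)

-- ===== LEMMAS AND PROOFS =====

-- the common value both ports compute: sum over the distinct elements x of max 0 (count x - x)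
def fgsSum (l : List Int) : Int :=
  ((PySem.List.dedup l).map (fun x => max 0 ((l.count x : Int) - x))).sum

theorem foldl_add_map {α : Type} (l : List α) (f : α → Int) (t : Int) :
    l.foldl (fun s x => s + f x) t = t + (l.map f).sum := by
  induction l generalizing t with
  | nil => simp
  | cons x xs ih => simp [List.foldl_cons, ih, add_assoc]

theorem fgsSum_eq_finset (l : List Int) :
    fgsSum l = ∑ x ∈ l.toFinset, max 0 ((l.count x : Int) - x) := by
  unfold fgsSum
  rw [← List.sum_toFinset _ (PySem.List.nodup_dedup l)]
  congr 1
  ext x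
  simp

theorem fgsSum_perm {l₁ l₂ : List Int} (h : l₁.Perm l₂) : fgsSum l₁ = fgsSum l₂ := by
  rw [fgsSum_eq_finset, fgsSum_eq_finset, List.toFinset_eq_of_perm _ _ h]
  exact Finset.sum_congr rfl (fun x _ => by rw [h.count_eq])

theorem fgsSum_replicate_append (n : Nat) (hn : 1 ≤ n) (c : Int) (l : List Int) (hc : c ∉ l) :
    fgsSum (List.replicate n c ++ l) = max 0 ((n : Int) - c) + fgsSum l := by
  rw [fgsSum_eq_finset, fgsSum_eq_finset]
  have hfin : (List.replicate n c ++ l).toFinset = insert c l.toFinset := by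
    rw [List.toFinset_append, List.toFinset_replicate_of_ne_zero (by omega)]
    ext x; simp
  rw [hfin, Finset.sum_insert (by simpa using hc)]
  congr 1
  · have : (List.replicate n c ++ l).count c = n := by
      simp [List.count_append, List.count_eq_zero.mpr hc]
    rw [this]
  · refine Finset.sum_congr rfl (fun x hx => ?_)
    have hxc : x ≠ c := by
      intro h; exact hc (by simpa [h] using List.mem_toFinset.mp hx)
    have : (List.replicate n c ++ l).count x = l.count x := by
      simp [List.count_append, List.count_replicate, Ne.symm hxc]
    rw [this]

theorem fgs_scan_eq (xs : List Int) (cur : Int) (n : Nat) (total : Int)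
    (hn : 1 ≤ n) (hp : (cur :: xs).Pairwise (· ≤ ·)) :
    fgsScan xs cur (n : Int) total = total + fgsSum (List.replicate n cur ++ xs) := by
  induction xs generalizing cur n total with
  | nil =>
    rw [fgsScan]
    have h := fgsSum_replicate_append n hn cur [] (List.not_mem_nil)
    have h0 : fgsSum [] = 0 := by simp [fgsSum]
    simp only [List.append_nil] at h ⊢
    rw [h, h0]
    ring
  | cons x xs ih =>
    rw [fgsScan]
    rcases List.pairwise_cons.mp hp with ⟨hcle, hpx⟩
    by_cases hxc : x = cur
    · subst hxc
      rw [if_pos rfl]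
      have := ih x (n + 1) total (by omega) hpx
      push_cast at this
      rw [this, List.replicate_succ', List.append_assoc]
      simp
    · rw [if_neg hxc]
      have hnot : cur ∉ x :: xs := by
        intro hmem
        have hcx : cur < x := lt_of_le_of_ne (hcle x (by simp)) (fun h => hxc h.symm)
        rcases List.mem_cons.mp hmem with h | h
        · exact absurd h.symm hxc
        · have := (List.pairwise_cons.mp hpx).1 cur h
          omega
      have := ih x 1 (total + max 0 ((n : Int) - cur)) (le_refl 1) hpx
      push_cast at this
      rw [this, fgsSum_replicate_append n hn cur (x :: xs) hnot]
      simp only [List.singleton_append]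
      ring

theorem fgs_a_eq (N : Int) (A : List Int) : find_good_sequance N A = fgsSum A := by
  show List.foldl (fun total p => total + max 0 (p.2 - p.1)) 0
      (A.foldl (fun d x => d.insert x (d.getD x 0 + 1)) PySem.Dict.empty).items = fgsSum A
  rw [PySem.Dict.foldl_insert_getD_add_one_eq_counter, PySem.Dict.items_counter]
  rw [foldl_add_map, List.map_map]
  simp only [fgsSum, PySem.List.dedup_eq_ofList, zero_add]
  rfl

theorem fgs_b_eq (N : Int) (A : List Int) : find_good_sequance_alt N A = fgsSum A := by
  unfold find_good_sequance_alt
  rcases h : PySem.List.sorted A (fun x => x) false with _ | ⟨x, xs⟩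
  · have : A = [] := (PySem.List.sorted_eq_nil_iff A (fun x => x) false).mp h
    subst this
    simp [fgsSum]
  · have hperm : (x :: xs).Perm A := h ▸ PySem.List.sorted_perm A (fun x => x) false
    have hp : (x :: xs).Pairwise (· ≤ ·) := by
      have := PySem.List.sorted_pairwise A (fun x => x)
      rw [h] at this
      exact this
    show fgsScan xs x 1 0 = fgsSum A
    have := fgs_scan_eq xs x 1 0 (le_refl 1) hp
    push_cast at this
    rw [this]
    simp only [List.singleton_append, zero_add]
    exact fgsSum_perm hperm

-- ===== VERDICT (by name: the statement is the Claim_ definition above) =====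
theorem find_good_sequance_spec : Claim_equal_find_good_sequance := by
  intro N A _
  unfold Spec_find_good_sequance
  rw [fgs_a_eq, fgs_b_eq]
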